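-- pv_equiv track=rewrite | github.com/xjfcnfw3/algorithm | programers/숫자게임.py | solution
-- ===== SOURCE A (Python) =====
-- def solution(A, B):
--     A.sort(reverse = True)
--     B.sort(reverse = True)
--     answer = 0
--     for a in A:
--         if a >= B[0]:
--             continue
--         answer += 1
--         del B[0]
--     return answer
-- ===== SOURCE B (Python) =====
-- def solution(A, B):
--     # Two-pointer scan over sorted copies: O(n log n), no O(n) del B[0].
--     # Does not mutate A/B in place (A sorts them in place); return value only.
--     As = sorted(A, reverse=True)
--     Bs = sorted(B, reverse=True)
--     j = 0
--     answer = 0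
--     for a in As:
--         if j < len(Bs) and a < Bs[j]:
--             answer += 1
--             j += 1
--     return answer
-- ===== Notes on version B (the rewrite author's own statement) =====
-- stated objective: faster
-- what changed: Replace repeated del B[0] (an O(n) list shift per win) by an advancing index into the sorted copy of B, a single two-pointer pass; B also leaves the argument lists unmutated.
-- outside the precondition, e.g. on solution([5, 5], [3]): A returns 0, B returns 0; on solution([0, 1], [3]): A raises IndexError, B returns 1
import Mathlib
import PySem

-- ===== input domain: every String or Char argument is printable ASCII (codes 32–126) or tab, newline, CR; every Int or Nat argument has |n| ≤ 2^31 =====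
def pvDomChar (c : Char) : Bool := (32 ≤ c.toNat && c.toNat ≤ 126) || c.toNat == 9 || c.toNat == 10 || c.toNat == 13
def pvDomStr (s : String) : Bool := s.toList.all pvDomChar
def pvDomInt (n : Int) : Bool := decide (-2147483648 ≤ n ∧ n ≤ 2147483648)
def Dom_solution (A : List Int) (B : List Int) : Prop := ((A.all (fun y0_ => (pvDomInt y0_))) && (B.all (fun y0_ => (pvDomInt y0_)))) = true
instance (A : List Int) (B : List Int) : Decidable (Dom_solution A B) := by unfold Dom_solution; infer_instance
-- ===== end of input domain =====

-- B replaces del B[0] by an advancing index into sorted B (two-pointer pass); faster as timed.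
-- A sorts its arguments in place; B does not mutate them — equivalence here is about the return value only.

-- ===== PORT A =====
-- state: none models Python's IndexError (B exhausted); some (remaining B, answer)
def solStepA (st : Option (List Int × Int)) (a : Int) : Option (List Int × Int) :=
  match st with
  | none => none
  | some (bs, ans) =>
    match bs with
    | [] => none                 -- Python raises IndexError here; excluded by Pre_solution
    | b :: rest => if a ≥ b then some (b :: rest, ans) else some (rest, ans + 1)

def solution (A : List Int) (B : List Int) : Int :=
  let As := PySem.List.sorted A (fun x => x) true
  let Bs := PySem.List.sorted B (fun x => x) true
  match As.foldl solStepA (some (Bs, (0 : Int))) with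
  | some (_, ans) => ans
  | none => 0                    -- IndexError; unreachable under Pre_solution

-- ===== PORT B =====
def solStepB (Bs : List Int) (st : Nat × Int) (a : Int) : Nat × Int :=
  match st with
  | (j, ans) => if j < Bs.length ∧ a < Bs.getD j 0 then (j + 1, ans + 1) else (j, ans)

def solution_alt (A : List Int) (B : List Int) : Int :=
  let As := PySem.List.sorted A (fun x => x) true
  let Bs := PySem.List.sorted B (fun x => x) true
  (As.foldl (solStepB Bs) ((0 : Nat), (0 : Int))).2

-- ===== PRECONDITION & SPEC =====
-- Pre_ excludes inputs with more A-cards than B-cards: there A may exhaust B and raise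
-- IndexError (though on some such inputs it still returns; see the cites).
def Pre_solution (A : List Int) (B : List Int) : Prop := A.length ≤ B.length
instance (A : List Int) (B : List Int) : Decidable (Pre_solution A B) := by unfold Pre_solution; infer_instance
def pvWitness_solution : List Int × List Int := ([3, 1, 2], [2, 2, 4])

def Spec_solution (A : List Int) (B : List Int) (out : Int) : Prop := out = solution_alt A B
instance (A : List Int) (B : List Int) (out : Int) : Decidable (Spec_solution A B out) := by unfold Spec_solution; infer_instance

-- ===== CLAIM (what is proved, stated in full; the proofs are below) =====
def Claim_equal_solution : Prop := ∀ (A : List Int) (B : List Int), Dom_solution A B → Pre_solution A B → Spec_solution A B (solution A B)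

-- ===== LEMMAS AND PROOFS =====
-- Invariant: while at least as many B-cards remain as A-cards (j + |l| ≤ |Bs|), A's fold
-- never hits the IndexError state, its remaining-B list is Bs.drop j, and it tracks B's fold.
theorem sol_inv (Bs : List Int) (l : List Int) :
    ∀ (j : Nat) (ans : Int), j + l.length ≤ Bs.length →
      l.foldl solStepA (some (Bs.drop j, ans)) =
        some (Bs.drop (l.foldl (solStepB Bs) (j, ans)).1, (l.foldl (solStepB Bs) (j, ans)).2) := by
  induction l with
  | nil => intro j ans _; simp
  | cons a t ih =>
    intro j ans hj
    simp only [List.length_cons] at hj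
    have hjlt : j < Bs.length := by omega
    rcases hd : Bs.drop j with _ | ⟨b, rest⟩
    · exact absurd hd (by simp [List.drop_eq_nil_iff]; omega)
    have hb : Bs.getD j 0 = b := by
      have := List.getElem_drop (xs := Bs) (i := j) (j := 0) (h := by simpa using hjlt)
      simp [hd] at this
      simp [List.getD, List.getElem?_eq_getElem (by simpa using hjlt), ← this]
    have hrest : rest = Bs.drop (j + 1) := by
      have := List.drop_drop (i := 1) (j := j) (l := Bs)
      simp [hd] at this
      simpa [Nat.add_comm] using this
    simp only [List.foldl_cons]
    by_cases hcmp : a ≥ b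
    · have hng : ¬ (j < Bs.length ∧ a < Bs.getD j 0) := by
        intro h; rw [hb] at h; omega
      simp only [solStepA, solStepB, hd, hcmp, if_true, hng, if_false]
      rw [← hd]; exact ih j ans (by omega)
    · have hg : (j < Bs.length ∧ a < Bs.getD j 0) := ⟨hjlt, by rw [hb]; omega⟩
      simp only [solStepA, solStepB, hd, hcmp, if_false, hg, if_true]
      rw [hrest]; exact ih (j + 1) (ans + 1) (by omega)

-- ===== VERDICT (by name: the statement is the Claim_ definition above) =====
theorem solution_spec : Claim_equal_solution := by
  intro A B _ hpre
  unfold Spec_solution solution solution_alt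
  have hlen : (PySem.List.sorted A (fun x => x) true).length
      ≤ (PySem.List.sorted B (fun x => x) true).length := by
    simpa [PySem.List.length_sorted] using hpre
  have := sol_inv (PySem.List.sorted B (fun x => x) true)
    (PySem.List.sorted A (fun x => x) true) 0 0 (by simpa using hlen)
  simp only [List.drop_zero] at this
  simp [this]
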